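-- pv_equiv track=rewrite | github.com/Giyanellow/skills-match-agent | src/core/extractor.py | _format_quality_score
-- ===== SOURCE A (Python) =====
-- def _format_quality_score(format_str: str) -> int:
--     """
--     Calculate quality score for a skill format string.
--
--     Scoring hierarchy (higher is better):
--     - Mixed case (e.g., "TypeScript", "PostgreSQL"): +10 points
--     - Special characters (e.g., "C++", ".NET", "CI/CD"): +5 points
--     - All uppercase (e.g., "AWS", "SQL"): +2 points
--     - All lowercase (e.g., "python", "docker"): +1 point
--
--     Args:
--         format_str: A skill name in specific formatting
--
--     Returns:
--         Integer score (higher = better format quality)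
--
--     Example:
--         >>> extractor._format_quality_score("Node.js")  # Mixed + special
--         15
--         >>> extractor._format_quality_score("nodejs")   # Lowercase
--         1
--     """
--     score = 0
--
--     # Mixed case is preferred (TypeScript, PostgreSQL)
--     if any(c.isupper() for c in format_str) and any(
--         c.islower() for c in format_str
--     ):
--         score += 10
--
--     # Special characters indicate proper formatting (C++, .NET, CI/CD)
--     if any(c in format_str for c in ["+", "#", ".", "-", "/"]):
--         score += 5
--
--     # All uppercase is acceptable (AWS, SQL, API)
--     if format_str.isupper() and len(format_str) > 1:
--         score += 2
--
--     # All lowercase is least preferred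
--     if format_str.islower():
--         score += 1
--
--     return score
-- ===== SOURCE B (Python) =====
-- def _format_quality_score(format_str: str) -> int:
--     has_upper = has_lower = has_special = False
--     for c in format_str:
--         if c.isupper():
--             has_upper = True
--         if c.islower():
--             has_lower = True
--         if c in "+#.-/":
--             has_special = True
--     score = 0
--     if has_upper and has_lower:
--         score += 10
--     if has_special:
--         score += 5
--     if has_upper and not has_lower and len(format_str) > 1:
--         score += 2
--     if has_lower and not has_upper:
--         score += 1
--     return score
-- ===== Notes on version B (the rewrite author's own statement) =====
-- stated objective: simpler
-- what changed: Replaces A's four separate scans (two any() generators, a membership scan over the special list, and str.isupper()/str.islower()) with a single pass over the characters that sets three boolean flags, then computes the score from the flags.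
import Mathlib
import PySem

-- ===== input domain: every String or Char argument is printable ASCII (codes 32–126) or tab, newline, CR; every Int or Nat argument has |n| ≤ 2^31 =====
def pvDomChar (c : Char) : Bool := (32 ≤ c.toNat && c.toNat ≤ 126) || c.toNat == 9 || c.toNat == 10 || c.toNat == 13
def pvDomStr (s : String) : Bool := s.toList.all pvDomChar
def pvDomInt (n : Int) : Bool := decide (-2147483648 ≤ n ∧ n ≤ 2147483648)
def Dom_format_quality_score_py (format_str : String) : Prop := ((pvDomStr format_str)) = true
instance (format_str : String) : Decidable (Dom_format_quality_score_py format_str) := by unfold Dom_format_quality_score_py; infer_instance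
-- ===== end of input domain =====

-- B replaces A's four separate scans (two any() generators, the special-character scan, str.isupper()/str.islower())
-- with one pass over the characters collecting three boolean flags; objective: simpler, same cost.


-- ===== PORT A =====
-- str.isupper(): at least one cased character and no lowercase one; on the ASCII domain the
-- cased characters are exactly those with PySem.Chars.isupper/islower true, so this is exact there.
def pyStrIsupper (cs : List Char) : Bool :=
  cs.any (fun c => PySem.Chars.isupper c || PySem.Chars.islower c) && cs.all (fun c => !(PySem.Chars.islower c))

-- str.islower(): symmetric (exact on the ASCII domain)
def pyStrIslower (cs : List Char) : Bool :=
  cs.any (fun c => PySem.Chars.isupper c || PySem.Chars.islower c) && cs.all (fun c => !(PySem.Chars.isupper c))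

def format_quality_score_py (format_str : String) : Int :=
  let cs := format_str.toList
  let score : Int := 0
  -- mixed case: any(c.isupper()) and any(c.islower())
  let score := if cs.any PySem.Chars.isupper && cs.any PySem.Chars.islower then score + 10 else score
  -- any(c in format_str for c in ["+", "#", ".", "-", "/"])
  let score := if (["+", "#", ".", "-", "/"] : List String).any (fun t => PySem.Str.isIn t format_str)
               then score + 5 else score
  -- format_str.isupper() and len(format_str) > 1
  let score := if pyStrIsupper cs && decide (1 < PySem.Str.len format_str) then score + 2 else score
  -- format_str.islower()
  let score := if pyStrIslower cs then score + 1 else score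
  score

-- ===== PORT B =====
def pvSpecials : List Char := ['+', '#', '.', '-', '/']

def pvStep (f : Bool × Bool × Bool) (c : Char) : Bool × Bool × Bool :=
  (f.1 || PySem.Chars.isupper c, f.2.1 || PySem.Chars.islower c, f.2.2 || pvSpecials.contains c)

def format_quality_score_py_alt (format_str : String) : Int :=
  let f := format_str.toList.foldl pvStep (false, false, false)
  let hu := f.1
  let hl := f.2.1
  let hs := f.2.2
  (if hu && hl then 10 else 0) + (if hs then 5 else 0)
    + (if hu && !hl && decide (1 < PySem.Str.len format_str) then 2 else 0)
    + (if hl && !hu then 1 else 0)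

-- ===== PRECONDITION & SPEC =====
def Spec_format_quality_score_py (format_str : String) (out : Int) : Prop := out = format_quality_score_py_alt format_str
instance (format_str : String) (out : Int) : Decidable (Spec_format_quality_score_py format_str out) := by unfold Spec_format_quality_score_py; infer_instance

-- ===== CLAIM (what is proved, stated in full; the proofs are below) =====
def Claim_equal_format_quality_score_py : Prop := ∀ (format_str : String), Dom_format_quality_score_py format_str → Spec_format_quality_score_py format_str (format_quality_score_py format_str)

-- ===== LEMMAS AND PROOFS =====

-- the single fold of B computes exactly the three `any` scans of A
theorem foldl_pvStep (cs : List Char) (a b d : Bool) :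
    cs.foldl pvStep (a, b, d)
      = (a || cs.any PySem.Chars.isupper, b || cs.any PySem.Chars.islower,
         d || cs.any (fun c => pvSpecials.contains c)) := by
  induction cs generalizing a b d with
  | nil => simp
  | cons c cs ih => simp [pvStep, ih, Bool.or_assoc]

theorem any_or_aux (l : List Char) (p q : Char → Bool) :
    l.any (fun c => p c || q c) = (l.any p || l.any q) := by
  induction l with
  | nil => simp
  | cons c cs ih =>
    simp only [List.any_cons, ih]
    cases p c <;> cases q c <;> simp

-- `sub in s` for a one-character sub is membership of that character
theorem isIn_single (s t : String) (c : Char) (ht : t.toList = [c]) :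
    PySem.Str.isIn t s = s.toList.contains c := by
  by_cases hm : c ∈ s.toList
  · simp only [List.contains_eq_mem, hm, decide_true]
    rw [PySem.Str.isIn_iff_infix, ht]
    exact (List.singleton_infix_iff c s.toList).mpr hm
  · simp only [List.contains_eq_mem, hm, decide_false]
    rw [← Bool.not_eq_true, PySem.Str.isIn_iff_infix, ht]
    exact fun h' => hm ((List.singleton_infix_iff c s.toList).mp h')

theorem contains_or (l : List Char) :
    (l.contains '+' || (l.contains '#' || (l.contains '.' || (l.contains '-' || l.contains '/'))))
      = l.any (fun c => pvSpecials.contains c) := by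
  rw [Bool.eq_iff_iff]
  simp only [Bool.or_eq_true, List.contains_iff_mem, List.any_eq_true, pvSpecials, List.mem_cons,
    List.not_mem_nil, or_false]
  constructor
  · rintro (h | h | h | h | h) <;> exact ⟨_, h, by simp⟩
  · rintro ⟨c, hc, h | h | h | h | h⟩ <;> subst h <;> tauto

-- A's scan over the five one-character strings equals a membership scan over the characters
theorem special_any (s : String) :
    (["+", "#", ".", "-", "/"] : List String).any (fun t => PySem.Str.isIn t s)
      = s.toList.any (fun c => pvSpecials.contains c) := by
  simp only [List.any_cons, List.any_nil, Bool.or_false,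
    isIn_single s "+" '+' (by decide), isIn_single s "#" '#' (by decide),
    isIn_single s "." '.' (by decide), isIn_single s "-" '-' (by decide),
    isIn_single s "/" '/' (by decide)]
  exact contains_or s.toList

-- ===== VERDICT (by name: the statement is the Claim_ definition above) =====
theorem format_quality_score_py_spec : Claim_equal_format_quality_score_py := by
  intro s _
  unfold Spec_format_quality_score_py
  show format_quality_score_py s = format_quality_score_py_alt s
  unfold format_quality_score_py format_quality_score_py_alt pyStrIsupper pyStrIslower
  simp only [special_any, foldl_pvStep, any_or_aux, ← List.not_any_eq_all_not, Bool.false_or]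
  cases hu : List.any s.toList PySem.Chars.isupper <;>
    cases hl : List.any s.toList PySem.Chars.islower <;>
      cases hs : List.any s.toList (fun c => pvSpecials.contains c) <;>
        cases hg : decide (1 < PySem.Str.len s) <;> simp
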